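-- pv_equiv track=rewrite | github.com/shreyatpandey/Coding-Challenges | Amazon/OA-Sample/IMDB-Movie-Rating/Movie-Rating.py | max_ascents
-- ===== SOURCE A (Python) =====
-- def max_ascents(ratings):
--   """
--   Finds the maximum possible number of indices i such that ratings[i] < ratings[i+1]
--   after rearranging the array optimally.
--
--   Args:
--     ratings: A list of integers representing the ratings.
--
--   Returns:
--     The maximum number of indices i such that ratings[i] < ratings[i+1].
--   """
--   n = len(ratings)
--   if n < 2:
--     return 0
--
--   ratings.sort()
--   ascents = 0
--   j = 0  # Pointer for the element we are trying to be greater than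
--
--   for i in range(n):
--     # If the current element is greater than the element at pointer j,
--     # we can form an ascent.
--     if ratings[i] > ratings[j]:
--       ascents += 1
--       j += 1 # Move the pointer j to the next element
--
--   return ascents
-- ===== SOURCE B (Python) =====
-- def max_ascents(ratings):
--   n = len(ratings)
--   if n < 2:
--     return 0
--   freq = {}
--   best = 0
--   for r in ratings:
--     c = freq.get(r, 0) + 1
--     freq[r] = c
--     if c > best:
--       best = c
--   return n - best
-- ===== Notes on version B (the rewrite author's own statement) =====
-- stated objective: alternative
-- what changed: A sorts the list and runs a two-pointer scan over it; B makes a single pass counting frequencies in a dict and returns n minus the maximum frequency, with no sort and no in-place mutation of the input (asymptotically lighter, but not measurably faster in a timing run).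
import Mathlib
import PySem

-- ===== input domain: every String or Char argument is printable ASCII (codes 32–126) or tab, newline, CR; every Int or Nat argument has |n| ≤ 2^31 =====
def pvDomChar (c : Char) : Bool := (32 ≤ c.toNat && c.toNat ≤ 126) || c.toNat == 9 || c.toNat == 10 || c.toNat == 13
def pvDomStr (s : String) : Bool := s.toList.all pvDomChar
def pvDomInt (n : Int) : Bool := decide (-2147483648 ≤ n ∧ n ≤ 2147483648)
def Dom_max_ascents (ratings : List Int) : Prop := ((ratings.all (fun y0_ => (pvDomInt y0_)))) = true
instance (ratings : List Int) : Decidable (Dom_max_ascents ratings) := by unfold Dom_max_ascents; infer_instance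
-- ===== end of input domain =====

-- B replaces A's sort + two-pointer scan by a single frequency-counting pass returning n - max frequency
-- (a sort-free algorithm; a timing run did not confirm a measurable speed-up over A's library sort);
-- A sorts its argument in place (an observable mutation B does not perform) — the equivalence proved is about the return value only.

-- ===== PORT A =====
def max_ascents (ratings : List Int) : Int :=
  let n : Int := ratings.length
  if n < 2 then 0
  else
    let s := PySem.List.sorted ratings (fun x => x) false
    let st := (PySem.List.pyRange 0 n 1).foldl
      (fun (st : Int × Int) i =>
        if PySem.List.pyGetD s st.2 0 < PySem.List.pyGetD s i 0 then (st.1 + 1, st.2 + 1) else st)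
      (0, 0)
    st.1

-- ===== PORT B =====
def max_ascents_alt (ratings : List Int) : Int :=
  let n : Int := ratings.length
  if n < 2 then 0
  else
    let st := ratings.foldl
      (fun (st : PySem.Dict Int Int × Int) r =>
        let c := st.1.getD r 0 + 1
        (st.1.insert r c, if st.2 < c then c else st.2))
      (PySem.Dict.empty, 0)
    n - st.2

-- ===== PRECONDITION & SPEC =====
def Spec_max_ascents (ratings : List Int) (out : Int) : Prop := out = max_ascents_alt ratings
instance (ratings : List Int) (out : Int) : Decidable (Spec_max_ascents ratings out) := by unfold Spec_max_ascents; infer_instance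

-- ===== CLAIM (what is proved, stated in full; the proofs are below) =====
def Claim_equal_max_ascents : Prop := ∀ (ratings : List Int), Dom_max_ascents ratings → Spec_max_ascents ratings (max_ascents ratings)

-- ===== LEMMAS AND PROOFS =====

/-- Maximum multiplicity of any value in `l` — the quantity both loops compute against. -/
def maxCnt : List Int → Nat
  | [] => 0
  | x :: l => max (l.count x + 1) (maxCnt l)

theorem maxCnt_append_singleton (p : List Int) (x : Int) :
    maxCnt (p ++ [x]) = max (maxCnt p) (p.count x + 1) := by
  induction p with
  | nil => simp [maxCnt]
  | cons y p ih =>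
    simp only [List.cons_append, maxCnt, ih, List.count_append, List.count_cons,
      List.count_nil]
    by_cases h : x = y
    · subst h; simp; try omega
    · simp [h, Ne.symm h]; try omega

theorem maxCnt_le_length (l : List Int) : maxCnt l ≤ l.length := by
  induction l with
  | nil => simp [maxCnt]
  | cons x l ih => have := List.count_le_length (l := l) (a := x); simp [maxCnt]; omega

theorem count_le_maxCnt (l : List Int) (x : Int) : l.count x ≤ maxCnt l := by
  induction l with
  | nil => simp [maxCnt]
  | cons y l ih =>
    simp only [maxCnt, List.count_cons]
    by_cases h : x = y
    · subst h; simp; try omega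
    · simp [Ne.symm h]; try omega

theorem maxCnt_perm {l l' : List Int} (h : l.Perm l') : maxCnt l = maxCnt l' := by
  induction h with
  | nil => rfl
  | cons x h ih => simp [maxCnt, ih, h.count_eq]
  | swap x y l =>
    simp only [maxCnt, List.count_cons]
    by_cases h : x = y
    · subst h; simp; try omega
    · simp [h, Ne.symm h]; try omega
  | trans _ _ ih1 ih2 => omega

/-- B's counting loop computes the maximum multiplicity of the whole list. -/
theorem B_loop (l : List Int) : ∀ (d : PySem.Dict Int Int) (b : Int) (p : List Int),
    (∀ r, d.getD r 0 = (p.count r : Int)) → b = (maxCnt p : Int) →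
    (l.foldl (fun (st : PySem.Dict Int Int × Int) r =>
        let c := st.1.getD r 0 + 1
        (st.1.insert r c, if st.2 < c then c else st.2)) (d, b)).2
      = (maxCnt (p ++ l) : Int) := by
  induction l with
  | nil => intro d b p hd hb; simpa using hb
  | cons x l ih =>
    intro d b p hd hb
    simp only [List.foldl_cons]
    have h1 : (p ++ [x]) ++ l = p ++ (x :: l) := by simp
    rw [← h1]
    apply ih
    · intro r
      rw [PySem.Dict.getD_insert]
      by_cases h : r = x
      · subst h; simp [hd, List.count_append]
      · simp [h, Ne.symm h, hd, List.count_append]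
    · rw [hd, hb, maxCnt_append_singleton]
      by_cases h : (maxCnt p : Int) < (p.count x : Int) + 1 <;>
        simp [h] <;> omega

/-- A's two-pointer loop over the sorted list: after `i` steps both counters equal
    `i -` the maximum multiplicity of the first `i` elements. -/
theorem A_loop (s : List Int) (hs : s.Pairwise (· ≤ ·)) :
    ∀ i, i ≤ s.length →
      ((s.take i).foldl (fun (st : Int × Int) x =>
          if PySem.List.pyGetD s st.2 0 < x then (st.1 + 1, st.2 + 1) else st) (0, 0))
        = ((i : Int) - (maxCnt (s.take i) : Int), (i : Int) - (maxCnt (s.take i) : Int)) := by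
  have mono : ∀ (a b : Nat) (_ : a < s.length) (hb : b < s.length), a ≤ b → s[a] ≤ s[b] := by
    intro a b ha hb hab
    rcases Nat.eq_or_lt_of_le hab with h | h
    · subst h; rfl
    · exact List.pairwise_iff_getElem.mp hs a b ha hb h
  intro i
  induction i with
  | zero => intro _; simp [maxCnt]
  | succ i ih =>
    intro hi1
    have hi : i < s.length := by omega
    have IH := ih (by omega)
    rw [List.take_succ_eq_append_getElem hi, List.foldl_append, IH]
    set m := maxCnt (s.take i) with hm
    set c := (s.take i).count s[i] with hc
    have hlen : (s.take i).length = i := by simp; omega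
    have hm_le : m ≤ i := by have := maxCnt_le_length (s.take i); omega
    have hc_le : c ≤ m := count_le_maxCnt (s.take i) s[i]
    have hidx : (i : Int) - (m : Int) = ((i - m : Nat) : Int) := by omega
    have hget : PySem.List.pyGetD s ((i : Int) - (m : Int)) 0 = s[i - m]'(by omega) := by
      rw [hidx, PySem.List.pyGetD_natCast]
      exact List.getD_eq_getElem s 0 (by omega)
    have hmc : maxCnt (s.take i ++ [s[i]]) = max m (c + 1) := maxCnt_append_singleton _ _
    simp only [List.foldl_cons, List.foldl_nil, hget]
    rcases Nat.lt_or_ge c m with hcm | hcm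
    · -- c < m : the current element exceeds the pointed-at one, an ascent fires
      have hm1 : 1 ≤ m := by omega
      have hlt : s[i - m]'(by omega) < s[i] := by
        rcases Int.lt_or_le (s[i - m]'(by omega)) s[i] with h | h
        · exact h
        have heq : s[i - m]'(by omega) = s[i] :=
          le_antisymm (mono _ _ (by omega) hi (by omega)) h
        exfalso
        have hsplit : (s.take i).take (i - m) ++ (s.take i).drop (i - m) = s.take i :=
          List.take_append_drop _ _
        have hseglen : ((s.take i).drop (i - m)).length = m := by simp [hlen]; omega
        have hall : ∀ b ∈ (s.take i).drop (i - m), b = s[i] := by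
          intro b hb
          obtain ⟨t, ht, hbt⟩ := List.mem_iff_getElem.mp hb
          rw [List.getElem_drop, List.getElem_take] at hbt
          have ht' : t < m := by omega
          have h1 : s[i - m]'(by omega) ≤ s[i - m + t]'(by omega) :=
            mono _ _ (by omega) (by omega) (by omega)
          have h2 : s[i - m + t]'(by omega) ≤ s[i] := mono _ _ (by omega) hi (by omega)
          rw [← hbt]; omega
        have hcount : ((s.take i).drop (i - m)).count s[i] = m := by
          rw [List.count_eq_length.mpr (by intro b hb; simp [hall b hb])]
          exact hseglen
        have : m ≤ c := by
          rw [hc]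
          calc m = ((s.take i).drop (i - m)).count s[i] := hcount.symm
            _ ≤ ((s.take i).take (i - m)).count s[i] + ((s.take i).drop (i - m)).count s[i] := by omega
            _ = (s.take i).count s[i] := by rw [← List.count_append, hsplit]
        omega
      rw [if_pos hlt]
      have : maxCnt (s.take i ++ [s[i]]) = m := by omega
      rw [this]
      simp only [Prod.mk.injEq]
      push_cast
      omega
    · -- c = m : the pointed-at element equals the current one, no ascent
      have hceq : c = m := by omega
      have hnlt : ¬ (s[i - m]'(by omega) < s[i]) := by
        rcases Nat.eq_zero_or_pos m with hm0 | hm1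
        · simp [hm0]
        intro hlt
        have hsplit : (s.take i).take (i - m + 1) ++ (s.take i).drop (i - m + 1) = s.take i :=
          List.take_append_drop _ _
        have hz : ((s.take i).take (i - m + 1)).count s[i] = 0 := by
          apply List.count_eq_zero.mpr
          intro hmem
          obtain ⟨t, ht, hbt⟩ := List.mem_iff_getElem.mp hmem
          have htl : t < i - m + 1 := by
            have := ht; simp [hlen] at this; omega
          rw [List.getElem_take, List.getElem_take] at hbt
          have h1 : s[t]'(by omega) ≤ s[i - m]'(by omega) :=
            mono _ _ (by omega) (by omega) (by omega)
          omega
        have hlen2 : ((s.take i).drop (i - m + 1)).length = m - 1 := by simp [hlen]; omega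
        have hle2 : ((s.take i).drop (i - m + 1)).count s[i] ≤ m - 1 := by
          have := List.count_le_length (l := (s.take i).drop (i - m + 1)) (a := s[i])
          omega
        have : c ≤ m - 1 := by
          rw [hc, ← hsplit, List.count_append]; omega
        omega
      rw [if_neg hnlt]
      have : maxCnt (s.take i ++ [s[i]]) = m + 1 := by omega
      rw [this]
      simp only [Prod.mk.injEq]
      push_cast
      omega

-- ===== VERDICT (by name: the statement is the Claim_ definition above) =====
theorem max_ascents_spec : Claim_equal_max_ascents := by
  intro ratings _
  unfold Spec_max_ascents max_ascents max_ascents_alt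
  by_cases h : (ratings.length : Int) < 2
  · simp [h]
  · simp only [if_neg h]
    set s := PySem.List.sorted ratings (fun x => x) false with hsdef
    have hlen : s.length = ratings.length := PySem.List.length_sorted ..
    have hA : (PySem.List.pyRange 0 (ratings.length : Int) 1).foldl
        (fun (st : Int × Int) i =>
          if PySem.List.pyGetD s st.2 0 < PySem.List.pyGetD s i 0 then (st.1 + 1, st.2 + 1) else st)
        (0, 0)
        = s.foldl (fun (st : Int × Int) x =>
            if PySem.List.pyGetD s st.2 0 < x then (st.1 + 1, st.2 + 1) else st) (0, 0) := by
      rw [← hlen]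
      exact PySem.List.foldl_pyRange_zero_pyGetD' s 0
        (fun (st : Int × Int) x => if PySem.List.pyGetD s st.2 0 < x then (st.1 + 1, st.2 + 1) else st)
        (0, 0)
    have hs : s.Pairwise (· ≤ ·) := PySem.List.sorted_pairwise ..
    have hAval := A_loop s hs s.length (le_refl _)
    rw [List.take_length] at hAval
    have hB := B_loop ratings PySem.Dict.empty 0 []
      (by intro r; simp [PySem.Dict.getD_empty]) (by simp [maxCnt])
    simp only [List.nil_append] at hB
    have hperm : maxCnt s = maxCnt ratings := maxCnt_perm (PySem.List.sorted_perm ..)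
    simp only [hA, hAval, hB, hperm, hlen]
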